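-- pv_equiv track=rewrite | github.com/Jakolo6/Working_Project_Explainable_Layers | backend/app/services/supabase_service.py | _get_raw_ratings_by_layer
-- ===== SOURCE A (Python) =====
-- from typing import Dict, Optional
--
-- def _get_raw_ratings_by_layer(ratings: list) -> Dict:
--     """Get raw rating values for box plot visualization"""
--     result = {}
--     for layer_num in [1, 2, 3, 4]:
--         layer_ratings = [r for r in ratings if r.get('layer_number') == layer_num]
--         result[f'layer_{layer_num}'] = {
--             'understanding': [r.get('understanding_rating', 0) or 0 for r in layer_ratings],
--             'communicability': [r.get('communicability_rating', 0) or 0 for r in layer_ratings],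
--             'fairness': [r.get('perceived_fairness_rating', 0) or 0 for r in layer_ratings],
--             'cognitive_load': [r.get('cognitive_load_rating', 0) or 0 for r in layer_ratings],
--             'reliance': [r.get('reliance_intention_rating', 0) or 0 for r in layer_ratings],
--             'time_seconds': [r.get('time_spent_seconds', 0) or 0 for r in layer_ratings],
--         }
--     return result
-- ===== SOURCE B (Python) =====
-- _METRICS = [
--     ('understanding', 'understanding_rating'),
--     ('communicability', 'communicability_rating'),
--     ('fairness', 'perceived_fairness_rating'),
--     ('cognitive_load', 'cognitive_load_rating'),
--     ('reliance', 'reliance_intention_rating'),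
--     ('time_seconds', 'time_spent_seconds'),
-- ]
--
-- def _get_raw_ratings_by_layer(ratings: list) -> dict:
--     """Single pass: partition the records into the four layer groups once,
--     then build each layer's six metric lists from its own group."""
--     groups = {1: [], 2: [], 3: [], 4: []}
--     for r in ratings:
--         g = groups.get(r.get('layer_number'))
--         if g is not None:
--             g.append(r)
--     return {
--         f'layer_{n}': {name: [r.get(key, 0) or 0 for r in g] for name, key in _METRICS}
--         for n, g in groups.items()
--     }
-- ===== Notes on version B (the rewrite author's own statement) =====
-- stated objective: alternative
-- what changed: A rescans the whole ratings list once per layer (four filter passes, each followed by six metric passes); B partitions the records into the four layer groups in a single pass over ratings and then builds each layer's six metric lists from its own group.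
import Mathlib
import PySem

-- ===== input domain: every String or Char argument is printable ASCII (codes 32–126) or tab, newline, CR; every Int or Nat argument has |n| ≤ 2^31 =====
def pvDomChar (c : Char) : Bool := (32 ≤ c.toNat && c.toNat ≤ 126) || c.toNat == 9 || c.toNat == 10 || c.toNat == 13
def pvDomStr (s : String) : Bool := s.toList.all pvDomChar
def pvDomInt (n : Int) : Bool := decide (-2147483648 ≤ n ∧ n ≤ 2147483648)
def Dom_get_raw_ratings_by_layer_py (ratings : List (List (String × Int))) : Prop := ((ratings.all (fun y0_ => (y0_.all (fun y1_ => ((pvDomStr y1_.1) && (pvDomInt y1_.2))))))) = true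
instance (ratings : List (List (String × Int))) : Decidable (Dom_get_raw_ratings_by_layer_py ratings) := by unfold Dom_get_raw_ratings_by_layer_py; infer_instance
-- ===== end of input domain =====

-- B replaces A's per-layer rescans of the whole ratings list by one partition pass; equivalence proved on all inputs.

-- r.get(key, 0) or 0   (shared by both ports: both Pythons contain this exact expression)
def pvOrVal (r : List (String × Int)) (k : String) : Int :=
  let v := (PySem.Dict.mk r).getD k 0
  if v == 0 then 0 else v

-- ===== PORT A =====
def get_raw_ratings_by_layer_py (ratings : List (List (String × Int))) : List (String × List (String × List Int)) :=
  (([1, 2, 3, 4] : List Int).foldl (fun result layer_num =>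
      let layer_ratings := ratings.filter (fun r => (PySem.Dict.mk r).get? "layer_number" == some layer_num)
      PySem.Dict.insert result ("layer_" ++ PySem.Int.toStr layer_num)
        [("understanding", layer_ratings.map (fun r => pvOrVal r "understanding_rating")),
         ("communicability", layer_ratings.map (fun r => pvOrVal r "communicability_rating")),
         ("fairness", layer_ratings.map (fun r => pvOrVal r "perceived_fairness_rating")),
         ("cognitive_load", layer_ratings.map (fun r => pvOrVal r "cognitive_load_rating")),
         ("reliance", layer_ratings.map (fun r => pvOrVal r "reliance_intention_rating")),
         ("time_seconds", layer_ratings.map (fun r => pvOrVal r "time_spent_seconds"))])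
    PySem.Dict.empty).items

-- ===== PORT B =====
def pvMetrics : List (String × String) :=
  [("understanding", "understanding_rating"),
   ("communicability", "communicability_rating"),
   ("fairness", "perceived_fairness_rating"),
   ("cognitive_load", "cognitive_load_rating"),
   ("reliance", "reliance_intention_rating"),
   ("time_seconds", "time_spent_seconds")]

-- one step of B's partition loop: g = groups.get(r.get('layer_number')); if g is not None: g.append(r)
def pvStepB (groups : PySem.Dict Int (List (List (String × Int)))) (r : List (String × Int)) :
    PySem.Dict Int (List (List (String × Int))) :=
  match (PySem.Dict.mk r).get? "layer_number" with
  | none => groups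
  | some n => if groups.contains n then groups.modify n [] (fun g => g ++ [r]) else groups

def get_raw_ratings_by_layer_py_alt (ratings : List (List (String × Int))) : List (String × List (String × List Int)) :=
  let groups0 : PySem.Dict Int (List (List (String × Int))) :=
    PySem.Dict.ofList [(1, []), (2, []), (3, []), (4, [])]
  let groups := ratings.foldl pvStepB groups0
  groups.items.map (fun p =>
    ("layer_" ++ PySem.Int.toStr p.1,
     pvMetrics.map (fun m => (m.1, p.2.map (fun r => pvOrVal r m.2)))))

-- ===== PRECONDITION & SPEC =====
def Spec_get_raw_ratings_by_layer_py (ratings : List (List (String × Int))) (out : List (String × List (String × List Int))) : Prop := out = get_raw_ratings_by_layer_py_alt ratings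
instance (ratings : List (List (String × Int))) (out : List (String × List (String × List Int))) : Decidable (Spec_get_raw_ratings_by_layer_py ratings out) := by unfold Spec_get_raw_ratings_by_layer_py; infer_instance

-- ===== CLAIM (what is proved, stated in full; the proofs are below) =====
def Claim_equal_get_raw_ratings_by_layer_py : Prop := ∀ (ratings : List (List (String × Int))), Dom_get_raw_ratings_by_layer_py ratings → Spec_get_raw_ratings_by_layer_py ratings (get_raw_ratings_by_layer_py ratings)

-- ===== LEMMAS AND PROOFS =====

-- the filtered group of layer n
def pvGroup (ratings : List (List (String × Int))) (n : Int) : List (List (String × Int)) :=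
  ratings.filter (fun r => (PySem.Dict.mk r).get? "layer_number" == some n)

lemma pvStepB_contains (acc : PySem.Dict Int (List (List (String × Int)))) (r : List (String × Int)) (k : Int) :
    (pvStepB acc r).contains k = acc.contains k := by
  unfold pvStepB
  cases h : (PySem.Dict.mk r).get? "layer_number" with
  | none => rfl
  | some n =>
    simp only []
    split_ifs with hc
    · rw [PySem.Dict.contains_modify]
      by_cases hk : k = n
      · subst hk; simp [hc]
      · simp [hk]
    · rfl

lemma pvFoldl_getD (l : List (List (String × Int))) (acc : PySem.Dict Int (List (List (String × Int))))
    (hc : ∀ k : Int, acc.contains k = (k == 1 || k == 2 || k == 3 || k == 4))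
    (n : Int) (hn : n = 1 ∨ n = 2 ∨ n = 3 ∨ n = 4) :
    (l.foldl pvStepB acc).getD n [] = acc.getD n [] ++ pvGroup l n := by
  induction l generalizing acc with
  | nil => simp [pvGroup]
  | cons r t ih =>
    have hstep : ∀ k : Int, (pvStepB acc r).contains k = (k == 1 || k == 2 || k == 3 || k == 4) := by
      intro k; rw [pvStepB_contains]; exact hc k
    have := ih (pvStepB acc r) hstep
    rw [List.foldl_cons, this]
    unfold pvStepB pvGroup
    cases h : (PySem.Dict.mk r).get? "layer_number" with
    | none => simp [h]
    | some m =>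
      simp only [List.filter_cons, h]
      by_cases hm : m = n
      · subst hm
        have : acc.contains m = true := by rw [hc]; rcases hn with h|h|h|h <;> simp [h]
        simp [this, PySem.Dict.getD_modify_self]
      · have hpred : ((PySem.Dict.mk r).get? "layer_number" == some n) = false := by
          simp [h, hm]
        by_cases hcm : acc.contains m = true
        · simp only [hcm, if_true, PySem.Dict.getD_modify, Ne.symm hm, if_false]
          simp [hm]
        · simp only [hcm]
          simp [hm]

lemma pvStepB_keys (acc : PySem.Dict Int (List (List (String × Int)))) (r : List (String × Int)) :
    (pvStepB acc r).keys = acc.keys := by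
  unfold pvStepB
  cases h : (PySem.Dict.mk r).get? "layer_number" with
  | none => rfl
  | some n =>
    simp only []
    split_ifs with hc
    · rw [PySem.Dict.keys_modify]
      exact PySem.Dict.keys_insert_of_contains _ _ hc
    · rfl

lemma pvFoldl_keys (l : List (List (String × Int))) (acc : PySem.Dict Int (List (List (String × Int)))) :
    (l.foldl pvStepB acc).keys = acc.keys := by
  induction l generalizing acc with
  | nil => rfl
  | cons r t ih => rw [List.foldl_cons, ih, pvStepB_keys]

lemma pvFoldl_groups (ratings : List (List (String × Int))) :
    (ratings.foldl pvStepB (PySem.Dict.ofList [(1, []), (2, []), (3, []), (4, [])])).items =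
      [(1, pvGroup ratings 1), (2, pvGroup ratings 2), (3, pvGroup ratings 3), (4, pvGroup ratings 4)] := by
  have hlit : (PySem.Dict.ofList [(1, []), (2, []), (3, []), (4, [])] :
      PySem.Dict Int (List (List (String × Int)))) = PySem.Dict.mk [(1, []), (2, []), (3, []), (4, [])] := by
    decide
  rw [hlit]
  have hc : ∀ k : Int, (PySem.Dict.mk [((1 : Int), ([] : List (List (String × Int)))), (2, []), (3, []), (4, [])]).contains k
      = (k == 1 || k == 2 || k == 3 || k == 4) := by
    intro k
    simp only [PySem.Dict.contains_mk]
    by_cases h1 : k = 1 <;> by_cases h2 : k = 2 <;> by_cases h3 : k = 3 <;> by_cases h4 : k = 4 <;>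
      simp_all [show ∀ a b : Int, (a == b) = decide (a = b) from fun _ _ => rfl, eq_comm]
  have hkeys := pvFoldl_keys ratings (PySem.Dict.mk [((1 : Int), ([] : List (List (String × Int)))), (2, []), (3, []), (4, [])])
  have hnd : (ratings.foldl pvStepB (PySem.Dict.mk [(1, []), (2, []), (3, []), (4, [])])).keys.Nodup := by
    rw [hkeys]; decide
  have hitems := PySem.Dict.items_eq_map_keys (ratings.foldl pvStepB (PySem.Dict.mk [(1, []), (2, []), (3, []), (4, [])])) hnd []
  rw [hitems, hkeys]
  have h1 := pvFoldl_getD ratings _ hc 1 (by norm_num)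
  have h2 := pvFoldl_getD ratings _ hc 2 (by norm_num)
  have h3 := pvFoldl_getD ratings _ hc 3 (by norm_num)
  have h4 := pvFoldl_getD ratings _ hc 4 (by norm_num)
  simp [PySem.Dict.keys_mk, PySem.Dict.getD] at *
  exact ⟨h1, h2, h3, h4⟩

-- ===== VERDICT (by name: the statement is the Claim_ definition above) =====
theorem get_raw_ratings_by_layer_py_spec : Claim_equal_get_raw_ratings_by_layer_py := by
  intro ratings _
  unfold Spec_get_raw_ratings_by_layer_py get_raw_ratings_by_layer_py get_raw_ratings_by_layer_py_alt
  have e1 : PySem.Int.toStr 1 = "1" := by decide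
  have e2 : PySem.Int.toStr 2 = "2" := by decide
  have e3 : PySem.Int.toStr 3 = "3" := by decide
  have e4 : PySem.Int.toStr 4 = "4" := by decide
  simp only [pvFoldl_groups]
  simp [pvMetrics, pvGroup, List.foldl, e1, e2, e3, e4, PySem.Dict.insert,
    PySem.Dict.empty, PySem.Dict.contains]
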